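-- pv_equiv track=rewrite | github.com/HIROMU1015/Partially-Randomized-Trotter | src/trotterlib/df_cost_plotting.py | _csv_fieldnames
-- ===== SOURCE A (Python) =====
-- from typing import Any, Iterable, Mapping, Sequence
--
-- def _csv_fieldnames(rows: Sequence[Mapping[str, Any]]) -> list[str]:
--     preferred = [
--         "molecule",
--         "molecule_type",
--         "pf_label",
--         "order",
--         "ld",
--         "cost_kind",
--         "ratio_kind",
--         "g_total",
--         "g_total_ratio",
--         "g_det",
--         "g_rand",
--         "g_rand_input",
--         "q_opt",
--         "kappa_opt",
--         "c_gs_d",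
--         "error_budget_rule",
--         "lambda_r",
--         "df_cost_model",
--         "reference_randomized_cost_mode",
--         "qpe_beta",
--         "raw_total_ref_rz_depth",
--         "total_ref_rz_depth",
--         "deterministic_step_cost_value",
--         "reference_full_rz_depth",
--         "reference_scale",
--         "reference_tail_rz_depth",
--         "df_reference_rz_layer_key",
--         "df_reference_artifact_source",
--         "df_reference_artifact_kind",
--         "grouping_cost_unit",
--         "grouping_cost_model",
--         "pauli_rotations_per_step",
--         "df_rank_actual",
--         "ld_anchor",
--         "source_kind",
--         "g_total_num",
--         "g_total_den",
--         "ld_num",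
--         "ld_den",
--     ]
--     keys = {key for row in rows for key in row}
--     return [key for key in preferred if key in keys] + sorted(keys - set(preferred))
-- ===== SOURCE B (Python) =====
-- def _csv_fieldnames(rows):
--     preferred = [
--         "molecule",
--         "molecule_type",
--         "pf_label",
--         "order",
--         "ld",
--         "cost_kind",
--         "ratio_kind",
--         "g_total",
--         "g_total_ratio",
--         "g_det",
--         "g_rand",
--         "g_rand_input",
--         "q_opt",
--         "kappa_opt",
--         "c_gs_d",
--         "error_budget_rule",
--         "lambda_r",
--         "df_cost_model",
--         "reference_randomized_cost_mode",
--         "qpe_beta",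
--         "raw_total_ref_rz_depth",
--         "total_ref_rz_depth",
--         "deterministic_step_cost_value",
--         "reference_full_rz_depth",
--         "reference_scale",
--         "reference_tail_rz_depth",
--         "df_reference_rz_layer_key",
--         "df_reference_artifact_source",
--         "df_reference_artifact_kind",
--         "grouping_cost_unit",
--         "grouping_cost_model",
--         "pauli_rotations_per_step",
--         "df_rank_actual",
--         "ld_anchor",
--         "source_kind",
--         "g_total_num",
--         "g_total_den",
--         "ld_num",
--         "ld_den",
--     ]
--     rank = {name: i for i, name in enumerate(preferred)}
--     keys = {key for row in rows for key in row}
--     return sorted(keys, key=lambda k: (rank.get(k, len(preferred)), k))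
-- ===== Notes on version B (the rewrite author's own statement) =====
-- stated objective: idiomatic
-- what changed: A filters the preferred list against the key set and appends the sorted set-difference; B builds a rank dict once and returns a single sorted() of all keys under the composite key (rank.get(k, len(preferred)), k).
import Mathlib
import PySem

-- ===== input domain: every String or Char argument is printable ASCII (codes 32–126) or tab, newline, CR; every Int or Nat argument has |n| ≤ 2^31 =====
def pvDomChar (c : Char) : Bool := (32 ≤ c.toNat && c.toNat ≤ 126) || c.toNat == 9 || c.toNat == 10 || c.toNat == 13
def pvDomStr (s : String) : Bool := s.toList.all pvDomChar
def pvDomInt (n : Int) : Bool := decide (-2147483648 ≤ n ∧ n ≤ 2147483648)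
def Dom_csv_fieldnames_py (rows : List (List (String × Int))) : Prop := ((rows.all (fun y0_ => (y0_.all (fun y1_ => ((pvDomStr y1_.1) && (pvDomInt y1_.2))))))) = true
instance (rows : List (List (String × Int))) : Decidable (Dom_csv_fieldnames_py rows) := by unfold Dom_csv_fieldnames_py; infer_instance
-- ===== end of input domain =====

-- B replaces A's two-part "filter preferred, then sorted set-difference" construction by one
-- composite-key sort (rank dict built once, sorted(keys, key=(rank, name))): an idiomatic single-sort decomposition.


-- the literal 'preferred' list both Pythons contain verbatim
def pvPreferred : List String := [
  "molecule", "molecule_type", "pf_label", "order", "ld", "cost_kind", "ratio_kind",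
  "g_total", "g_total_ratio", "g_det", "g_rand", "g_rand_input", "q_opt", "kappa_opt",
  "c_gs_d", "error_budget_rule", "lambda_r", "df_cost_model", "reference_randomized_cost_mode",
  "qpe_beta", "raw_total_ref_rz_depth", "total_ref_rz_depth", "deterministic_step_cost_value",
  "reference_full_rz_depth", "reference_scale", "reference_tail_rz_depth",
  "df_reference_rz_layer_key", "df_reference_artifact_source", "df_reference_artifact_kind",
  "grouping_cost_unit", "grouping_cost_model", "pauli_rotations_per_step", "df_rank_actual",
  "ld_anchor", "source_kind", "g_total_num", "g_total_den", "ld_num", "ld_den"]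

-- ===== PORT A =====
def csv_fieldnames_py (rows : List (List (String × Int))) : List String :=
  let preferred := pvPreferred
  -- keys = {key for row in rows for key in row}
  let keys : PySem.Set String := PySem.Set.ofList (rows.flatMap (fun row => row.map (fun p => p.1)))
  -- [key for key in preferred if key in keys] + sorted(keys - set(preferred))
  (preferred.filter (fun key => PySem.Set.contains keys key))
    ++ PySem.List.sorted (PySem.Set.diff keys (PySem.Set.ofList preferred)) (fun x => x) false

-- ===== PORT B =====
def csv_fieldnames_py_alt (rows : List (List (String × Int))) : List String :=
  let preferred := pvPreferred
  -- rank = {name: i for i, name in enumerate(preferred)}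
  let rank : PySem.Dict String Int :=
    (PySem.List.enumerate preferred 0).foldl (fun d p => d.insert p.2 p.1) PySem.Dict.empty
  -- keys = {key for row in rows for key in row}
  let keys : PySem.Set String := PySem.Set.ofList (rows.flatMap (fun row => row.map (fun p => p.1)))
  -- sorted(keys, key=lambda k: (rank.get(k, len(preferred)), k))
  PySem.List.sorted2 keys (fun k => rank.getD k (preferred.length : Int)) (fun k => k) false

-- ===== PRECONDITION & SPEC =====
def Spec_csv_fieldnames_py (rows : List (List (String × Int))) (out : List String) : Prop := out = csv_fieldnames_py_alt rows
instance (rows : List (List (String × Int))) (out : List String) : Decidable (Spec_csv_fieldnames_py rows out) := by unfold Spec_csv_fieldnames_py; infer_instance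

-- ===== CLAIM (what is proved, stated in full; the proofs are below) =====
def Claim_equal_csv_fieldnames_py : Prop := ∀ (rows : List (List (String × Int))), Dom_csv_fieldnames_py rows → Spec_csv_fieldnames_py rows (csv_fieldnames_py rows)

-- ===== LEMMAS AND PROOFS =====

-- the rank dict built in B
def pvRank : PySem.Dict String Int :=
  (PySem.List.enumerate pvPreferred 0).foldl (fun d p => d.insert p.2 p.1) PySem.Dict.empty

-- the composite sort key of B, as a lexicographic pair
def pvKey (k : String) : Int ×ₗ String := toLex (pvRank.getD k (pvPreferred.length : Int), k)


lemma pvPreferred_nodup : pvPreferred.Nodup := by decide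

lemma pvRank_items : pvRank.items = (PySem.List.enumerate pvPreferred 0).map (fun p => (p.2, p.1)) := by
  have h := PySem.Dict.items_foldl_insert_fresh (PySem.List.enumerate pvPreferred 0)
    (fun p => p.2) (fun p => p.1) PySem.Dict.empty
    (by intro a _; simp [PySem.Dict.contains_empty])
    (by rw [PySem.List.map_snd_enumerate]; exact pvPreferred_nodup)
  simpa [pvRank, PySem.Dict.items] using h

lemma pvRank_keys_nodup : pvRank.keys.Nodup :=
  PySem.Dict.nodup_keys_foldl_insert_key (PySem.List.enumerate pvPreferred 0)
    (fun p => p.2) (fun _ p => p.1) PySem.Dict.empty (by simp [PySem.Dict.keys_empty])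

lemma pvRank_getElem (i : Nat) (h : i < pvPreferred.length) (d0 : Int) :
    pvRank.getD pvPreferred[i] d0 = (i : Int) := by
  apply PySem.Dict.getD_of_mem_items _ _ pvRank_keys_nodup
  rw [pvRank_items]
  refine List.mem_map.mpr ⟨((i : Int), pvPreferred[i]), ?_, rfl⟩
  have he : i < (PySem.List.enumerate pvPreferred 0).length := by
    rwa [PySem.List.length_enumerate]
  have := PySem.List.getElem_enumerate pvPreferred 0 i he
  rw [show (0 : Int) + i = i by ring] at this
  exact this ▸ List.getElem_mem he

lemma pvRank_not_mem {k : String} (hk : k ∉ pvPreferred) (d0 : Int) : pvRank.getD k d0 = d0 := by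
  apply PySem.Dict.getD_of_not_contains
  have hkeys : pvRank.keys = PySem.Set.update PySem.Dict.empty.keys ((PySem.List.enumerate pvPreferred 0).map (fun p => p.2)) :=
    PySem.Dict.keys_foldl_insert_key (PySem.List.enumerate pvPreferred 0) (fun p => p.2) (fun _ p => p.1) PySem.Dict.empty
  rw [PySem.List.map_snd_enumerate, PySem.Dict.keys_empty] at hkeys
  rw [← Bool.not_eq_true, PySem.Dict.contains_iff_mem_keys, hkeys, PySem.Set.update_nil_left, PySem.Set.mem_ofList]
  exact hk

lemma rank_lt_of_mem {k : String} (hk : k ∈ pvPreferred) :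
    pvRank.getD k (pvPreferred.length : Int) < (pvPreferred.length : Int) := by
  obtain ⟨i, h, rfl⟩ := List.mem_iff_getElem.mp hk
  rw [pvRank_getElem i h]
  exact_mod_cast h

lemma before_eq (k1 : String → Int) :
    (fun a b => decide (k1 a < k1 b) || (!decide (k1 b < k1 a) && decide (a < b)))
      = (fun a b : String => decide ((toLex (k1 a, a) : Int ×ₗ String) < toLex (k1 b, b))) := by
  funext a b
  have hiff : (k1 a < k1 b ∨ ¬ k1 b < k1 a ∧ a < b) ↔ (toLex (k1 a, a) : Int ×ₗ String) < toLex (k1 b, b) := by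
    simp only [Prod.Lex.lt_iff, ofLex_toLex]
    constructor
    · rintro (h | ⟨h1, h2⟩)
      · exact Or.inl h
      · rcases lt_or_ge (k1 a) (k1 b) with h' | h'
        · exact Or.inl h'
        · exact Or.inr ⟨le_antisymm (not_lt.mp h1) h', h2⟩
    · rintro (h | ⟨h1, h2⟩)
      · exact Or.inl h
      · exact Or.inr ⟨by rw [h1]; exact lt_irrefl _, h2⟩
  calc (decide (k1 a < k1 b) || (!decide (k1 b < k1 a) && decide (a < b)))
      = decide (k1 a < k1 b ∨ ¬ k1 b < k1 a ∧ a < b) := by simp [← decide_not, not_lt]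
    _ = decide ((toLex (k1 a, a) : Int ×ₗ String) < toLex (k1 b, b)) := decide_eq_decide.mpr hiff

lemma sorted2_eq_sorted_lex (xs : List String) (k1 : String → Int) :
    PySem.List.sorted2 xs k1 (fun k => k) false
      = PySem.List.sorted xs (fun k => (toLex (k1 k, k) : Int ×ₗ String)) false := by
  rw [PySem.List.sorted_eq_foldl_insertBy]
  show xs.foldl (fun acc x => PySem.List.insertBy
      (fun a b => decide (k1 a < k1 b) || (!decide (k1 b < k1 a) && decide (a < b))) x acc) []
    = xs.foldl (fun acc x => PySem.List.insertBy
      (fun a b => decide ((toLex (k1 a, a) : Int ×ₗ String) < toLex (k1 b, b))) x acc) []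
  rw [before_eq]

lemma aOut_perm (keys : List String) (hnd : keys.Nodup) :
    ((pvPreferred.filter (fun key => PySem.Set.contains keys key))
      ++ PySem.List.sorted (PySem.Set.diff keys (PySem.Set.ofList pvPreferred)) (fun x => x) false).Perm keys := by
  have hsp := PySem.List.sorted_perm (PySem.Set.diff keys (PySem.Set.ofList pvPreferred)) (fun x : String => x) false
  have hdnd : (PySem.Set.diff keys (PySem.Set.ofList pvPreferred)).Nodup := PySem.Set.nodup_diff keys _ hnd
  have hRnd : (PySem.List.sorted (PySem.Set.diff keys (PySem.Set.ofList pvPreferred)) (fun x : String => x) false).Nodup :=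
    hsp.nodup_iff.mpr hdnd
  apply (List.perm_ext_iff_of_nodup ?_ hnd).mpr
  · intro a
    simp only [List.mem_append, List.mem_filter, PySem.List.mem_sorted, PySem.Set.mem_diff,
      PySem.Set.mem_ofList, PySem.Set.contains_eq_listContains, List.contains_iff_mem]
    constructor
    · rintro (⟨_, h⟩ | ⟨h, _⟩) <;> exact h
    · intro h
      by_cases hp : a ∈ pvPreferred
      · exact Or.inl ⟨hp, h⟩
      · exact Or.inr ⟨h, hp⟩
  · apply List.Nodup.append (pvPreferred_nodup.filter _) hRnd
    intro a haL haR
    have h1 : a ∈ pvPreferred := (List.mem_filter.mp haL).1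
    have h2 := (PySem.Set.mem_diff _ _ _).mp ((PySem.List.mem_sorted _ _ _ _).mp haR)
    exact h2.2 ((PySem.Set.mem_ofList _ _).mpr h1)

lemma aOut_pairwise (keys : List String) (hnd : keys.Nodup) :
    ((pvPreferred.filter (fun key => PySem.Set.contains keys key))
      ++ PySem.List.sorted (PySem.Set.diff keys (PySem.Set.ofList pvPreferred)) (fun x => x) false).Pairwise
      (fun a b => pvKey a < pvKey b) := by
  rw [List.pairwise_append]
  refine ⟨?_, ?_, ?_⟩
  · -- preferred part: ranks strictly increase
    apply List.Pairwise.filter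
    apply List.pairwise_iff_getElem.mpr
    intro i j hi hj hij
    show pvKey _ < pvKey _
    unfold pvKey
    rw [Prod.Lex.lt_iff]
    left
    rw [ofLex_toLex, ofLex_toLex, pvRank_getElem i hi, pvRank_getElem j hj]
    dsimp only
    exact_mod_cast hij
  · -- sorted leftover part: names strictly increase at equal rank
    have hdnd : (PySem.Set.diff keys (PySem.Set.ofList pvPreferred)).Nodup := PySem.Set.nodup_diff keys _ hnd
    have hself : PySem.Set.ofList (PySem.Set.diff keys (PySem.Set.ofList pvPreferred))
        = PySem.Set.diff keys (PySem.Set.ofList pvPreferred) := PySem.Set.ofList_eq_self_of_nodup _ hdnd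
    have hpw := PySem.List.sorted_ofList_pairwise_lt (PySem.Set.diff keys (PySem.Set.ofList pvPreferred))
    rw [hself] at hpw
    refine List.Pairwise.imp_of_mem ?_ hpw
    intro a b ha hb hab
    have hna : a ∉ pvPreferred := by
      have := (PySem.Set.mem_diff _ _ _).mp ((PySem.List.mem_sorted _ _ _ _).mp ha)
      exact fun hc => this.2 ((PySem.Set.mem_ofList _ _).mpr hc)
    have hnb : b ∉ pvPreferred := by
      have := (PySem.Set.mem_diff _ _ _).mp ((PySem.List.mem_sorted _ _ _ _).mp hb)
      exact fun hc => this.2 ((PySem.Set.mem_ofList _ _).mpr hc)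
    show pvKey a < pvKey b
    unfold pvKey
    rw [Prod.Lex.lt_iff]
    right
    rw [ofLex_toLex, ofLex_toLex, pvRank_not_mem hna, pvRank_not_mem hnb]
    dsimp only
    exact ⟨rfl, hab⟩
  · -- cross: every preferred key ranks below every leftover key
    intro a ha b hb
    have hpa : a ∈ pvPreferred := (List.mem_filter.mp ha).1
    have hnb : b ∉ pvPreferred := by
      have := (PySem.Set.mem_diff _ _ _).mp ((PySem.List.mem_sorted _ _ _ _).mp hb)
      exact fun hc => this.2 ((PySem.Set.mem_ofList _ _).mpr hc)
    show pvKey a < pvKey b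
    unfold pvKey
    rw [Prod.Lex.lt_iff]
    left
    rw [ofLex_toLex, ofLex_toLex, pvRank_not_mem hnb]
    dsimp only
    exact rank_lt_of_mem hpa

-- ===== VERDICT (by name: the statement is the Claim_ definition above) =====
theorem csv_fieldnames_py_spec : Claim_equal_csv_fieldnames_py := by
  intro rows _
  unfold Spec_csv_fieldnames_py csv_fieldnames_py csv_fieldnames_py_alt
  rw [sorted2_eq_sorted_lex]
  rw [show ((PySem.List.enumerate pvPreferred 0).foldl (fun d p => d.insert p.2 p.1) PySem.Dict.empty) = pvRank from rfl]
  exact (PySem.List.sorted_eq_of_perm_of_pairwise_lt _ _ pvKey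
    (aOut_perm _ (PySem.Set.nodup_ofList _)) (aOut_pairwise _ (PySem.Set.nodup_ofList _))).symm
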